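-- pv_equiv track=rewrite | github.com/diogotcorreia/tic-tac-toe-python | tic-tac-toe.py | escolher_vazios
-- ===== SOURCE A (Python) =====
-- def escolher_vazios(tuplo, jogador):
--     """
--     Recebe um tuplo e retorna um tuplo com o indice (0 a n) de
--     todas as entradas nulas no tuplo original.
--     Se alguma entrada nao nula nao pertercer ao jogador, retorna tuplo vazio.
--
--     escolher_vazios: tuplo X jogador -> tuplo
--     """
--
--     vazios = ()
--     for entrada in range(len(tuplo)):
--         if tuplo[entrada] == 0:
--             vazios += (entrada, )
--         elif tuplo[entrada] != jogador:
--             return ()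
--     return vazios
-- ===== SOURCE B (Python) =====
-- def escolher_vazios(tuplo, jogador):
--     if any(x != 0 and x != jogador for x in tuplo):
--         return ()
--     return tuple(i for i, x in enumerate(tuplo) if x == 0)
-- ===== Notes on version B (the rewrite author's own statement) =====
-- stated objective: simpler
-- what changed: A interleaves validation and index collection in one indexed loop with an early return; B decomposes into two passes: an any() validation pass, then an enumerate comprehension collecting zero indices.
import Mathlib
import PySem

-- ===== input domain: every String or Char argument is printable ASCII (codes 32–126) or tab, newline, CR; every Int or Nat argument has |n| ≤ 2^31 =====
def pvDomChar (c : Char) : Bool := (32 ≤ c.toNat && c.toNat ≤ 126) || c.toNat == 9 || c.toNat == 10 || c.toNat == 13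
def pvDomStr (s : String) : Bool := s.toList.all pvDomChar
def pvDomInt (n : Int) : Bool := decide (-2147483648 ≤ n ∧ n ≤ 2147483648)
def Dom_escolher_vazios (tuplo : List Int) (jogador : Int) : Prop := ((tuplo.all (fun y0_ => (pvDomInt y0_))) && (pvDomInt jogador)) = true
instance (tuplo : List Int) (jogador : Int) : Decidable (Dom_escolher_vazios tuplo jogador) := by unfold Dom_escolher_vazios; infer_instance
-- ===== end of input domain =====

-- B replaces A's single interleaved loop (early return inside) by two passes: a validation
-- pass and a zero-index collection pass; objective: simpler.

-- ===== PORT A =====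
-- A's for-loop over range(len(tuplo)), walking the tuple with the running index,
-- accumulator `vazios`, early return () on a foreign nonzero entry.
def evGoA (jogador : Int) : List Int → Int → List Int → List Int
  | [], _, acc => acc
  | x :: rest, i, acc =>
      if x = 0 then evGoA jogador rest (i + 1) (acc ++ [i])
      else if x ≠ jogador then []
      else evGoA jogador rest (i + 1) acc

def escolher_vazios (tuplo : List Int) (jogador : Int) : List Int :=
  evGoA jogador tuplo 0 []

-- ===== PORT B =====
def escolher_vazios_alt (tuplo : List Int) (jogador : Int) : List Int :=
  if tuplo.any (fun x => x ≠ 0 && x ≠ jogador) then []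
  else (PySem.List.enumerate tuplo).filterMap (fun p => if p.2 = 0 then some p.1 else none)

-- ===== PRECONDITION & SPEC =====
def Spec_escolher_vazios (tuplo : List Int) (jogador : Int) (out : List Int) : Prop := out = escolher_vazios_alt tuplo jogador
instance (tuplo : List Int) (jogador : Int) (out : List Int) : Decidable (Spec_escolher_vazios tuplo jogador out) := by unfold Spec_escolher_vazios; infer_instance

-- ===== CLAIM (what is proved, stated in full; the proofs are below) =====
def Claim_equal_escolher_vazios : Prop := ∀ (tuplo : List Int) (jogador : Int), Dom_escolher_vazios tuplo jogador → Spec_escolher_vazios tuplo jogador (escolher_vazios tuplo jogador)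

-- ===== LEMMAS AND PROOFS =====
theorem evGoA_eq (jogador : Int) (l : List Int) : ∀ (i : Int) (acc : List Int),
    evGoA jogador l i acc =
      if l.any (fun x => x ≠ 0 && x ≠ jogador) then []
      else acc ++ (PySem.List.enumerate l i).filterMap
        (fun p => if p.2 = 0 then some p.1 else none) := by
  induction l with
  | nil => intro i acc; simp [evGoA, PySem.List.enumerate_nil]
  | cons x rest ih =>
    intro i acc
    by_cases hx : x = 0
    · subst hx
      simp [evGoA, ih, PySem.List.enumerate_cons]
    · by_cases hj : x = jogador
      · subst hj
        simp [evGoA, hx, ih, PySem.List.enumerate_cons]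
      · simp [evGoA, hx, hj]

-- ===== VERDICT (by name: the statement is the Claim_ definition above) =====
theorem escolher_vazios_spec : Claim_equal_escolher_vazios := by
  intro tuplo jogador _
  unfold Spec_escolher_vazios escolher_vazios escolher_vazios_alt
  simp [evGoA_eq]
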